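-- pv_equiv track=rewrite | github.com/progSeminarG/nimmt | texasholdem_Dealer_shirai.py | mulc
-- ===== SOURCE A (Python) =====
-- def mulc(x,cards):
--     rt=[]
--     for i in range(13):
--         if cards.count(14-i) == x:
--             rt+=[14-i]*x
--             cards.remove(14-i)
--             break
--     return rt,cards
-- ===== SOURCE B (Python) =====
-- def mulc(x, cards):
--     # single pass over a sorted copy, tracking the current run (value, length);
--     # the last run with value in 2..14 and length exactly x is the highest one
--     best = None
--     s = sorted(cards)
--     if s:
--         cur = s[0]
--         run = 1
--         for v in s[1:]:
--             if v == cur: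
--                 run += 1
--             else:
--                 if 2 <= cur <= 14 and run == x:
--                     best = cur
--                 cur, run = v, 1
--         if 2 <= cur <= 14 and run == x:
--             best = cur
--     if best is None:
--         return [], cards
--     cards.remove(best)
--     return [best] * x, cards
-- ===== Notes on version B (the rewrite author's own statement) =====
-- stated objective: alternative
-- what changed: Replaces the descending 14..2 scan with a full cards.count pass per rank by sort-then-run-length-scan: sort a copy of the hand, walk its equal-value runs in one pass, keep the last (hence highest) run with value in 2..14 and length exactly x, then remove one copy.
import Mathlib
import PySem

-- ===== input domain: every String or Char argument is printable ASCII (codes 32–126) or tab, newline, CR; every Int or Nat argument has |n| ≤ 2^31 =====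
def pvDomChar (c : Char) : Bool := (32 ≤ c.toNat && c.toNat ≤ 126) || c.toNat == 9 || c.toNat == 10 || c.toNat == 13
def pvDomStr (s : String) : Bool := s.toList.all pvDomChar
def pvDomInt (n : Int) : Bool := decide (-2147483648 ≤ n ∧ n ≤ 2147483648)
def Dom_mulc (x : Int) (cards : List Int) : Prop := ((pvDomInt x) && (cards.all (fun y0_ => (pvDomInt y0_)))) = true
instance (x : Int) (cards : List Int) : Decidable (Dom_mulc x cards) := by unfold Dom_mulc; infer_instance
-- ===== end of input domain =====

-- B replaces A's descending count-and-break rank scan by sort + one run-length pass over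
-- the sorted copy (equivalence is about the RETURN value; A mutates `cards` in place,
-- B does the same one-element removal in place).

-- ===== PORT A =====
-- the 'for i in range(13)' loop with its break; the `none` arm of remove? is Python's
-- ValueError (cards.remove of an absent rank), excluded by Pre_mulc below
def mulcLoopA (x : Int) (cards : List Int) : List Int → List Int × List Int
  | [] => ([], cards)
  | i :: rest =>
    if ((PySem.List.count cards (14 - i) : Int) == x) then
      match PySem.List.remove? cards (14 - i) with
      | some cs => (PySem.List.pyRepeat [14 - i] x, cs)
      | none => ([], [])
    else mulcLoopA x cards rest

def mulc (x : Int) (cards : List Int) : List Int × List Int :=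
  mulcLoopA x cards (PySem.List.pyRange 0 13 1)

-- ===== PORT B =====
-- Source B's 'for v in s[1:]' loop with its (cur, run, best) state, plus the trailing
-- end-of-list check of the last run
def runGo (x cur : Int) (run : Int) : List Int → Option Int → Option Int
  | [], best =>
      if (decide (2 ≤ cur) && decide (cur ≤ 14)) && (run == x) then some cur else best
  | v :: rest, best =>
      if v == cur then runGo x cur (run + 1) rest best
      else runGo x v 1 rest
        (if (decide (2 ≤ cur) && decide (cur ≤ 14)) && (run == x) then some cur else best)

def mulc_alt (x : Int) (cards : List Int) : List Int × List Int :=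
  let s := PySem.List.sorted cards (fun v => v) false
  let best : Option Int :=
    match s with
    | [] => none
    | c :: rest => runGo x c 1 rest none
  match best with
  | none => ([], cards)
  | some b =>
    match PySem.List.remove? cards b with
    | some cs => (PySem.List.pyRepeat [b] x, cs)
    | none => ([], [])   -- unreachable in Source B (the chosen run value is in cards)

-- ===== PRECONDITION & SPEC =====
-- Pre_ excludes exactly the inputs on which the Python A raises ValueError
-- (x = 0 while some rank 2..14 is absent from cards: cards.remove then fails).
def Pre_mulc (x : Int) (cards : List Int) : Prop :=
  x ≠ 0 ∨ ∀ r ∈ ([2,3,4,5,6,7,8,9,10,11,12,13,14] : List Int), r ∈ cards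
instance (x : Int) (cards : List Int) : Decidable (Pre_mulc x cards) := by unfold Pre_mulc; infer_instance

def pvWitness_mulc : Int × List Int := (2, [14, 5, 14, 3])

def Spec_mulc (x : Int) (cards : List Int) (out : List Int × List Int) : Prop := out = mulc_alt x cards
instance (x : Int) (cards : List Int) (out : List Int × List Int) : Decidable (Spec_mulc x cards out) := by unfold Spec_mulc; infer_instance

-- ===== CLAIM (what is proved, stated in full; the proofs are below) =====
def Claim_equal_mulc : Prop := ∀ (x : Int) (cards : List Int), Dom_mulc x cards → Pre_mulc x cards → Spec_mulc x cards (mulc x cards)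

-- ===== LEMMAS AND PROOFS =====

-- shared "what happens once the rank is chosen" shape (proof helper only)
def mulcApply (x : Int) (cards : List Int) : Option Int → List Int × List Int
  | none => ([], cards)
  | some r =>
    match PySem.List.remove? cards r with
    | some cs => (PySem.List.pyRepeat [r] x, cs)
    | none => ([], [])

theorem mulcLoopA_eq_find (x : Int) (cards : List Int) (is : List Int) :
    mulcLoopA x cards is
      = mulcApply x cards
          (List.find? (fun r => ((PySem.List.count cards r : Int) == x))
            (is.map (fun i => 14 - i))) := by
  induction is with
  | nil => rfl
  | cons i rest ih =>
    by_cases h : ((List.count (14 - i) cards : Int) = x)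
    · simp [mulcLoopA, PySem.List.count_eq, h, mulcApply]
    · simp [mulcLoopA, PySem.List.count_eq, h, ih]

theorem find?_reverse_eq_getLast?_filter (p : Int → Bool) (l : List Int) :
    List.find? p l.reverse = (l.filter p).getLast? := by
  rw [← List.head?_filter, List.filter_reverse, List.head?_reverse]

-- the filter test: value is a rank 2..14 occurring exactly x times in l
def pvQ (x : Int) (l : List Int) (u : Int) : Bool :=
  (decide (2 ≤ u) && decide (u ≤ 14)) && ((l.count u : Int) == x)

theorem getLast?_replicate_succ (n : Nat) (a : Int) :
    (List.replicate (n + 1) a).getLast? = some a := by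
  rw [List.replicate_succ', List.getLast?_append]; simp

-- the (cur, run, best) pass selects the last value of the sorted list passing pvQ
theorem runGo_eq (x : Int) : ∀ (rest : List Int) (v : Int) (n : Nat) (best : Option Int),
    1 ≤ n → (List.replicate n v ++ rest).Pairwise (· ≤ ·) →
    runGo x v (n : Int) rest best
      = (((List.replicate n v ++ rest).filter
            (pvQ x (List.replicate n v ++ rest))).getLast?).or best := by
  intro rest
  induction rest with
  | nil =>
    intro v n best hn hs
    obtain ⟨m, rfl⟩ : ∃ m, n = m + 1 := ⟨n - 1, by omega⟩
    simp only [List.append_nil, runGo]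
    have hc : pvQ x (List.replicate (m + 1) v) v
        = ((decide (2 ≤ v) && decide (v ≤ 14)) && (((m + 1 : Nat) : Int) == x)) := by
      simp [pvQ]
    rw [List.filter_replicate, hc]
    by_cases hT : ((decide (2 ≤ v) && decide (v ≤ 14)) && (((m + 1 : Nat) : Int) == x)) = true
    · rw [if_pos hT, if_pos hT, getLast?_replicate_succ]; rfl
    · rw [if_neg hT, if_neg hT]; simp
  | cons w rest' ih =>
    intro v n best hn hs
    by_cases hw : w = v
    · subst hw
      have hstep : runGo x w ((n : Nat) : Int) (w :: rest') best
          = runGo x w ((n + 1 : Nat) : Int) rest' best := by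
        simp [runGo]
      have hlist : List.replicate n w ++ w :: rest'
          = List.replicate (n + 1) w ++ rest' := by
        rw [List.replicate_succ', List.append_assoc]; rfl
      rw [hstep, hlist, ih w (n + 1) best (by omega) (by rw [← hlist]; exact hs)]
    · -- new run starts at w
      have hvw : v < w := by
        have hle : v ≤ w := by
          rcases List.pairwise_append.1 hs with ⟨_, _, hrel⟩
          exact hrel v (by simp [List.mem_replicate]; omega) w (by simp)
        rcases lt_or_eq_of_le hle with h | h
        · exact h
        · exact absurd h.symm hw
      have hsw : (w :: rest').Pairwise (· ≤ ·) :=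
        hs.sublist (List.sublist_append_right _ _)
      have hgt : ∀ u ∈ w :: rest', v < u := by
        intro u hu
        rcases List.mem_cons.1 hu with rfl | hu'
        · exact hvw
        · exact lt_of_lt_of_le hvw ((List.pairwise_cons.1 hsw).1 u hu')
      have hne : ∀ u ∈ w :: rest', u ≠ v := fun u hu => ne_of_gt (hgt u hu)
      -- counts split
      have hcount_tail : ∀ u ∈ w :: rest',
          (List.replicate n v ++ w :: rest').count u = (w :: rest').count u := by
        intro u hu
        rw [List.count_append, List.count_replicate]
        have hne' : (v == u) = false := beq_eq_false_iff_ne.2 (Ne.symm (hne u hu))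
        rw [hne']
        simp
      have hcount_v : (List.replicate n v ++ w :: rest').count v = n := by
        rw [List.count_append, List.count_replicate]
        have h0 : (w :: rest').count v = 0 := by
          rw [List.count_eq_zero]
          intro hmem; exact hne v hmem rfl
        simp [h0]
      -- filter splits
      set T : Bool := ((decide (2 ≤ v) && decide (v ≤ 14)) && ((n : Int) == x)) with hT
      have hQv : pvQ x (List.replicate n v ++ w :: rest') v = T := by
        simp [pvQ, hcount_v, hT]
      have hfilter : (List.replicate n v ++ w :: rest').filter
            (pvQ x (List.replicate n v ++ w :: rest'))
          = (if T then List.replicate n v else [])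
              ++ (w :: rest').filter (pvQ x (w :: rest')) := by
        rw [List.filter_append, List.filter_replicate, hQv]
        congr 1
        apply List.filter_congr
        intro u hu
        simp [pvQ, hcount_tail u hu]
      have hstep : runGo x v ((n : Nat) : Int) (w :: rest') best
          = runGo x w (1 : Int) rest' (if T then some v else best) := by
        simp [runGo, hw, hT]
      rw [hstep]
      rw [show (1 : Int) = ((1 : Nat) : Int) from rfl,
          ih w 1 (if T then some v else best) (by omega) (by simpa using hsw)]
      simp only [List.replicate_one, List.singleton_append]
      rw [hfilter, List.getLast?_append, Option.or_assoc]
      congr 1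
      by_cases hTT : T = true
      · rw [if_pos hTT, if_pos hTT]
        obtain ⟨m, rfl⟩ : ∃ m, n = m + 1 := ⟨n - 1, by omega⟩
        rw [getLast?_replicate_succ]; rfl
      · rw [if_neg hTT, if_neg hTT]; rfl

-- the head-match of mulc_alt's best computation (proof helper; defeq to the inline match)
def pvBest (x : Int) : List Int → Option Int
  | [] => none
  | c :: rest => runGo x c 1 rest none

theorem best_eq (x : Int) (s : List Int) (hsorted : s.Pairwise (· ≤ ·)) :
    pvBest x s = (s.filter (pvQ x s)).getLast? := by
  cases s with
  | nil => rfl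
  | cons c rest =>
    have hs' : (List.replicate 1 c ++ rest).Pairwise (· ≤ ·) := by
      simpa using hsorted
    have h := runGo_eq x rest c 1 none (by omega) hs'
    simp only [List.replicate_one, List.singleton_append] at h
    show runGo x c 1 rest none = _
    rw [show (1 : Int) = ((1 : Nat) : Int) from rfl]
    rw [h, Option.or_none]

-- y ≤ the last element, for a sorted list
theorem pv_le_getLast (l : List Int) (hl : l.Pairwise (· ≤ ·)) :
    ∀ m, l.getLast? = some m → ∀ y ∈ l, y ≤ m := by
  induction l with
  | nil => simp
  | cons a t ih =>
    intro m hm y hy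
    cases t with
    | nil =>
      simp at hm hy; omega
    | cons b t' =>
      rw [List.getLast?_cons_cons] at hm
      rcases List.mem_cons.1 hy with rfl | hyt
      · exact (List.pairwise_cons.1 hl).1 m (List.mem_of_getLast? hm)
      · exact ih (List.pairwise_cons.1 hl).2 m hm y hyt

-- sorted Int lists with the same members have the same last element
theorem getLast?_eq_of_sorted_of_mem_iff (l r : List Int)
    (hl : l.Pairwise (· ≤ ·)) (hr : r.Pairwise (· ≤ ·))
    (h : ∀ m, m ∈ l ↔ m ∈ r) : l.getLast? = r.getLast? := by
  cases hL : l.getLast? with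
  | none =>
    have hlnil : l = [] := List.getLast?_eq_none_iff.1 hL
    have hrnil : r = [] := by
      apply List.eq_nil_iff_forall_not_mem.2
      intro m hm
      exact (List.ne_nil_of_mem ((h m).2 hm)) hlnil
    rw [hrnil]; rfl
  | some m =>
    have hml : m ∈ l := List.mem_of_getLast? hL
    have hmr : m ∈ r := (h m).1 hml
    cases hR : r.getLast? with
    | none =>
      exact absurd (List.getLast?_eq_none_iff.1 hR) (List.ne_nil_of_mem hmr)
    | some m' =>
      have hm'r : m' ∈ r := List.mem_of_getLast? hR
      have h1 : m ≤ m' := pv_le_getLast r hr m' hR m hmr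
      have h2 : m' ≤ m := pv_le_getLast l hl m hL m' ((h m').2 hm'r)
      rw [le_antisymm h1 h2]

theorem mem_ranks_iff (m : Int) :
    m ∈ ([2,3,4,5,6,7,8,9,10,11,12,13,14] : List Int) ↔ 2 ≤ m ∧ m ≤ 14 := by
  simp; omega

theorem mulc_eq_alt (x : Int) (cards : List Int) (hpre : Pre_mulc x cards) :
    mulc x cards = mulc_alt x cards := by
  -- A computes mulcApply of the last matching rank
  have hA : mulc x cards
      = mulcApply x cards
          ((([2,3,4,5,6,7,8,9,10,11,12,13,14] : List Int).filter
              (fun r => ((PySem.List.count cards r : Int) == x))).getLast?) := by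
    rw [mulc, show PySem.List.pyRange 0 13 1 = [0,1,2,3,4,5,6,7,8,9,10,11,12] from by decide,
        mulcLoopA_eq_find, ← find?_reverse_eq_getLast?_filter]
    norm_num
  -- B computes mulcApply of the last matching value of the sorted list
  have hsorted : (PySem.List.sorted cards (fun v => v) false).Pairwise (· ≤ ·) :=
    PySem.List.sorted_pairwise cards (fun v => v)
  have hApply : ∀ o : Option Int,
      (match o with
        | none => ([], cards)
        | some b =>
          match PySem.List.remove? cards b with
          | some cs => (PySem.List.pyRepeat [b] x, cs)
          | none => (([] : List Int), ([] : List Int))) = mulcApply x cards o := by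
    intro o; cases o <;> rfl
  have hB : mulc_alt x cards
      = mulcApply x cards
          (((PySem.List.sorted cards (fun v => v) false).filter
            (pvQ x (PySem.List.sorted cards (fun v => v) false))).getLast?) := by
    show (match pvBest x (PySem.List.sorted cards (fun v => v) false) with
      | none => ([], cards)
      | some b =>
        match PySem.List.remove? cards b with
        | some cs => (PySem.List.pyRepeat [b] x, cs)
        | none => ([], [])) = _
    rw [best_eq x _ hsorted, hApply]
  rw [hA, hB]
  congr 1
  -- the two selections agree under Pre_
  apply getLast?_eq_of_sorted_of_mem_iff
  · exact List.Pairwise.sublist List.filter_sublist (by decide)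
  · exact List.Pairwise.sublist List.filter_sublist hsorted
  · intro m
    have hmem_s : m ∈ PySem.List.sorted cards (fun v => v) false ↔ m ∈ cards :=
      PySem.List.mem_sorted cards (fun v => v) false m
    have hcnt : (PySem.List.sorted cards (fun v => v) false).count m = cards.count m :=
      (PySem.List.sorted_perm cards (fun v => v) false).count_eq m
    simp only [List.mem_filter, pvQ, PySem.List.count_eq, mem_ranks_iff, hcnt,
      Bool.and_eq_true, decide_eq_true_eq, beq_iff_eq, hmem_s]
    constructor
    · rintro ⟨⟨h2, h14⟩, hcount⟩
      refine ⟨?_, ⟨h2, h14⟩, hcount⟩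
      rcases hpre with hx | hall
      · have hpos : 0 < cards.count m := by
          rcases Nat.eq_zero_or_pos (cards.count m) with h0 | h0
          · exfalso; apply hx; rw [← hcount, h0]; rfl
          · exact h0
        exact List.count_pos_iff.1 hpos
      · exact hall m ((mem_ranks_iff m).2 ⟨h2, h14⟩)
    · rintro ⟨hmem, hrank, hcount⟩
      exact ⟨hrank, hcount⟩

-- ===== VERDICT (by name: the statement is the Claim_ definition above) =====
theorem mulc_spec : Claim_equal_mulc := by
  intro x cards _ hpre
  exact mulc_eq_alt x cards hpre
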